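-- pv_equiv track=rewrite | github.com/rkorzeniec/python-snippets | daily_byte/10_first_unique_charactes.py | check
-- ===== SOURCE A (Python) =====
-- def check(s: str) -> int:
--     checked_chars: dict[str, int] = {}
--     answer: int = -1
--
--     for index in range(len(s)):
--         if s[index] in checked_chars:
--             del(checked_chars[s[index]])
--         else:
--             checked_chars[s[index]] = index
--
--     if len(checked_chars) > 0:
--         answer = min(checked_chars.values())
--
--     return answer
-- ===== SOURCE B (Python) =====
-- def check(s: str) -> int:
--     counts: dict[str, int] = {}
--     last: dict[str, int] = {}
--     for i, ch in enumerate(s):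
--         counts[ch] = counts.get(ch, 0) + 1
--         last[ch] = i
--     survivors = [last[ch] for ch, n in counts.items() if n % 2 == 1]
--     return min(survivors) if survivors else -1
-- ===== Notes on version B (the rewrite author's own statement) =====
-- stated objective: alternative
-- what changed: Replaces the toggle-on-repeat dict (insert on first sight, delete on second) by two precomputed tables - a frequency counter and a last-index map built in one enumerate pass - then returns the minimum last-index over characters with odd count, or -1.
import Mathlib
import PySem

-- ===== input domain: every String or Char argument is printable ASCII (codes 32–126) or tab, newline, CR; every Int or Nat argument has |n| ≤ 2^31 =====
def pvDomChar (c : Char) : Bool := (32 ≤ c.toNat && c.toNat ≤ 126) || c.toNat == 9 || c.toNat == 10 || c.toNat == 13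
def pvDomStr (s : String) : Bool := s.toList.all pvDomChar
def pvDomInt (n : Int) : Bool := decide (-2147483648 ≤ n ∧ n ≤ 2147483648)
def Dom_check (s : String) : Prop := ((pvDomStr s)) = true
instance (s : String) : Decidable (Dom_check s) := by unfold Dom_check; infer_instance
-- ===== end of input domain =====

-- B replaces A's toggle-on-repeat dict by precomputed count and last-index tables (same O(n) cost, different decomposition).

-- ===== PORT A =====
-- A's tail after the loop: 'answer = -1; if len(checked_chars) > 0: answer = min(checked_chars.values())'
def pvFinishA (d : PySem.Dict Char Int) : Int :=
  if 0 < d.size then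
    match PySem.List.min? d.values (fun x => x) with
    | some m => m
    | none => -1
  else -1

def check (s : String) : Int :=
  pvFinishA
    ((PySem.List.pyRange 0 (PySem.Str.len s) 1).foldl
      (fun d index =>
        if d.contains (PySem.List.pyGetD s.toList index ' ')
        then d.erase (PySem.List.pyGetD s.toList index ' ')
        else d.insert (PySem.List.pyGetD s.toList index ' ') index)
      PySem.Dict.empty)

-- ===== PORT B =====
-- Source B's locals 'counts', 'last', 'survivors' as helpers
def pvCounts (xs : List Char) : PySem.Dict Char Int :=
  (PySem.List.enumerate xs 0).foldl (fun d p => d.insert p.2 (d.getD p.2 0 + 1)) PySem.Dict.empty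

def pvLast (xs : List Char) : PySem.Dict Char Int :=
  (PySem.List.enumerate xs 0).foldl (fun d p => d.insert p.2 p.1) PySem.Dict.empty

def pvSurvivors (xs : List Char) : List Int :=
  ((pvCounts xs).items.filter (fun p => PySem.Int.mod p.2 2 == 1)).map
    (fun p => (pvLast xs).getD p.1 0)

def check_alt (s : String) : Int :=
  match PySem.List.min? (pvSurvivors s.toList) (fun x => x) with
  | some m => m
  | none => -1

-- ===== PRECONDITION & SPEC =====
def Spec_check (s : String) (out : Int) : Prop := out = check_alt s
instance (s : String) (out : Int) : Decidable (Spec_check s out) := by unfold Spec_check; infer_instance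

-- ===== CLAIM (what is proved, stated in full; the proofs are below) =====
def Claim_equal_check : Prop := ∀ (s : String), Dom_check s → Spec_check s (check s)

-- ===== LEMMAS AND PROOFS =====

-- the three loop bodies, named for the proofs
def stepA (d : PySem.Dict Char Int) (p : Int × Char) : PySem.Dict Char Int :=
  if d.contains p.2 then d.erase p.2 else d.insert p.2 p.1

def stepC (d : PySem.Dict Char Int) (p : Int × Char) : PySem.Dict Char Int :=
  d.insert p.2 (d.getD p.2 0 + 1)

def stepL (d : PySem.Dict Char Int) (p : Int × Char) : PySem.Dict Char Int :=
  d.insert p.2 p.1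

-- Dict.erase is items.filter; PySem has no get?/keys lemmas for erase, so we prove the three we need.
lemma find?_filter_ne_self (l : List (Char × Int)) (k : Char) :
    (l.filter (fun p => !(p.1 == k))).find? (fun p => p.1 == k) = none := by
  induction l with
  | nil => rfl
  | cons x t ih =>
    by_cases h : x.1 = k
    · simp [h, ih]
    · simp [h, ih]

lemma find?_filter_of_ne (l : List (Char × Int)) (k k' : Char) (h : k' ≠ k) :
    (l.filter (fun p => !(p.1 == k))).find? (fun p => p.1 == k') =
      l.find? (fun p => p.1 == k') := by
  induction l with
  | nil => rfl
  | cons x t ih =>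
    by_cases hx' : x.1 = k'
    · simp [hx', h]
    · by_cases hx : x.1 = k
      · simp [hx, ih, Ne.symm h]
      · simp [hx, hx', ih]

lemma get?_erase_self (d : PySem.Dict Char Int) (k : Char) :
    (d.erase k).get? k = none := by
  simp only [PySem.Dict.erase, PySem.Dict.get?, find?_filter_ne_self, Option.map_none]

lemma get?_erase_of_ne (d : PySem.Dict Char Int) (k k' : Char) (h : k' ≠ k) :
    (d.erase k).get? k' = d.get? k' := by
  simp only [PySem.Dict.erase, PySem.Dict.get?, find?_filter_of_ne _ _ _ h]

lemma nodup_keys_erase (d : PySem.Dict Char Int) (k : Char)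
    (h : d.keys.Nodup) : (d.erase k).keys.Nodup := by
  have hsub := List.Sublist.map (fun p : Char × Int => p.1)
    (List.filter_sublist (p := fun p : Char × Int => !(p.1 == k)) (l := d.items))
  exact hsub.nodup h

-- the invariant tying A's toggled dict to B's count and last-index tables
lemma toggle_invariant (l : List (Int × Char)) (dA cd ld : PySem.Dict Char Int)
    (h : ∀ c, dA.get? c =
      if PySem.Int.mod (cd.getD c 0) 2 = 1 then some (ld.getD c 0) else none) :
    ∀ c, (l.foldl stepA dA).get? c =
      if PySem.Int.mod ((l.foldl stepC cd).getD c 0) 2 = 1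
      then some ((l.foldl stepL ld).getD c 0) else none := by
  induction l generalizing dA cd ld with
  | nil => exact h
  | cons p t ih =>
    simp only [List.foldl_cons]
    apply ih
    intro c
    by_cases hc : c = p.2
    · rw [hc]
      rw [stepA, stepC, stepL]
      have hcont : dA.contains p.2 = (dA.get? p.2).isSome := PySem.Dict.contains_eq_isSome_get? dA p.2
      have hm := PySem.Int.mod_eq_emod_of_pos (a := cd.getD p.2 0) (b := 2) (by norm_num)
      have hm1 := PySem.Int.mod_eq_emod_of_pos (a := cd.getD p.2 0 + 1) (b := 2) (by norm_num)
      by_cases hodd : PySem.Int.mod (cd.getD p.2 0) 2 = 1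
      · -- c present in dA: erase; count becomes even
        have hct : dA.contains p.2 = true := by rw [hcont, h p.2, if_pos hodd]; rfl
        rw [hct, if_pos rfl, get?_erase_self, PySem.Dict.getD_insert_self]
        rw [hm] at hodd
        rw [if_neg (by rw [hm1]; omega)]
      · -- c absent: insert with current index; count becomes odd
        have hcf : dA.contains p.2 = false := by rw [hcont, h p.2, if_neg hodd]; rfl
        rw [hcf]
        simp only [Bool.false_eq_true, if_false]
        rw [PySem.Dict.get?_insert_self, PySem.Dict.getD_insert_self,
          PySem.Dict.getD_insert_self]
        rw [hm] at hodd
        rw [if_pos (by rw [hm1]; omega)]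
    · rw [stepA, stepC, stepL, PySem.Dict.getD_insert_of_ne _ _ _ hc,
        PySem.Dict.getD_insert_of_ne _ _ _ hc]
      by_cases hcont : dA.contains p.2
      · rw [if_pos hcont, get?_erase_of_ne _ _ _ hc]; exact h c
      · rw [if_neg hcont, PySem.Dict.get?_insert_of_ne _ _ hc]; exact h c

lemma nodup_keys_foldl_stepA (l : List (Int × Char)) (dA : PySem.Dict Char Int)
    (h : dA.keys.Nodup) : (l.foldl stepA dA).keys.Nodup := by
  induction l generalizing dA with
  | nil => exact h
  | cons p t ih =>
    simp only [List.foldl_cons]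
    apply ih
    rw [stepA]
    by_cases hc : dA.contains p.2
    · rw [if_pos hc]; exact nodup_keys_erase _ _ h
    · rw [if_neg hc]; exact PySem.Dict.nodup_keys_insert _ _ _ h

lemma mem_values_iff (d : PySem.Dict Char Int) (hnd : d.keys.Nodup) (v : Int) :
    v ∈ d.values ↔ ∃ c, d.get? c = some v := by
  constructor
  · intro hv
    rcases List.mem_map.mp hv with ⟨p, hp, hpe⟩
    refine ⟨p.1, (PySem.Dict.get?_eq_some_iff_mem_items d p.1 v hnd).mpr ?_⟩
    rw [← hpe]
    exact hp
  · rintro ⟨c, hc⟩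
    exact List.mem_map.mpr ⟨(c, v), PySem.Dict.mem_items_of_get?_eq_some _ hc, rfl⟩

lemma min?_congr (l1 l2 : List Int) (h : ∀ x, x ∈ l1 ↔ x ∈ l2) :
    PySem.List.min? l1 (fun x => x) = PySem.List.min? l2 (fun x => x) := by
  cases h1 : PySem.List.min? l1 (fun x => x) with
  | none =>
    have he := (PySem.List.min?_eq_none_iff l1 _).mp h1
    subst he
    cases h2 : PySem.List.min? l2 (fun x => x) with
    | none => rfl
    | some m => exact absurd ((h m).mpr (PySem.List.min?_mem h2)) (List.not_mem_nil)
  | some m1 =>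
    cases h2 : PySem.List.min? l2 (fun x => x) with
    | none =>
      have he := (PySem.List.min?_eq_none_iff l2 _).mp h2
      subst he
      exact absurd ((h m1).mp (PySem.List.min?_mem h1)) (List.not_mem_nil)
    | some m2 =>
      have hm1 : m1 ∈ l2 := (h m1).mp (PySem.List.min?_mem h1)
      have hm2 : m2 ∈ l1 := (h m2).mpr (PySem.List.min?_mem h2)
      exact congrArg some
        (le_antisymm (PySem.List.min?_isMin h1 m2 hm2) (PySem.List.min?_isMin h2 m1 hm1))

-- A's loop over range(len(s)) is the stepA fold over enumerate(s)
lemma foldA_eq (s : String) :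
    (PySem.List.pyRange 0 (PySem.Str.len s) 1).foldl
      (fun d index =>
        if d.contains (PySem.List.pyGetD s.toList index ' ')
        then d.erase (PySem.List.pyGetD s.toList index ' ')
        else d.insert (PySem.List.pyGetD s.toList index ' ') index)
      PySem.Dict.empty
    = (PySem.List.enumerate s.toList 0).foldl stepA PySem.Dict.empty := by
  rw [PySem.List.enumerate_eq_map_pyRange s.toList ' ', List.foldl_map]
  rfl

lemma counts_eq (xs : List Char) :
    pvCounts xs = (PySem.List.enumerate xs 0).foldl stepC PySem.Dict.empty := rfl

lemma last_eq (xs : List Char) :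
    pvLast xs = (PySem.List.enumerate xs 0).foldl stepL PySem.Dict.empty := rfl

lemma nodup_keys_counts (xs : List Char) : (pvCounts xs).keys.Nodup :=
  PySem.Dict.nodup_keys_foldl_insert_key _ _ _ _ PySem.Dict.nodup_keys_empty

-- membership equivalence between A's surviving values and B's survivors list
lemma mem_survivors_iff (xs : List Char) (v : Int) :
    v ∈ ((PySem.List.enumerate xs 0).foldl stepA PySem.Dict.empty).values ↔
      v ∈ pvSurvivors xs := by
  have hnodA := nodup_keys_foldl_stepA (PySem.List.enumerate xs 0) PySem.Dict.empty
    PySem.Dict.nodup_keys_empty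
  have hinv := toggle_invariant (PySem.List.enumerate xs 0)
    PySem.Dict.empty PySem.Dict.empty PySem.Dict.empty
    (by intro c; rw [PySem.Dict.get?_empty, PySem.Dict.getD_empty]; decide)
  rw [mem_values_iff _ hnodA]
  rw [← counts_eq, ← last_eq] at hinv
  constructor
  · rintro ⟨c, hc⟩
    have h1 := hinv c
    rw [hc] at h1
    by_cases hodd : PySem.Int.mod ((pvCounts xs).getD c 0) 2 = 1
    · rw [if_pos hodd] at h1
      have hv : v = (pvLast xs).getD c 0 := by injection h1
      -- c is a key of counts with odd value
      cases hg : (pvCounts xs).get? c with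
      | none =>
        exfalso
        rw [PySem.Dict.getD_of_get?_eq_none _ 0 hg] at hodd
        exact absurd hodd (by decide)
      | some n =>
        have hgd := PySem.Dict.getD_of_get?_eq_some _ 0 hg
        refine List.mem_map.mpr ⟨(c, n), List.mem_filter.mpr
          ⟨(PySem.Dict.get?_eq_some_iff_mem_items _ c n (nodup_keys_counts xs)).mp hg, ?_⟩, ?_⟩
        · simp only [beq_iff_eq]
          rw [hgd] at hodd
          exact hodd
        · simp only
          rw [← hv]
    · rw [if_neg hodd] at h1
      exact absurd h1 (by simp)
  · intro hv
    rcases List.mem_map.mp hv with ⟨p, hp, hpe⟩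
    rcases List.mem_filter.mp hp with ⟨hpi, hpq⟩
    have hg : (pvCounts xs).get? p.1 = some p.2 := by
      refine (PySem.Dict.get?_eq_some_iff_mem_items _ p.1 p.2 (nodup_keys_counts xs)).mpr ?_
      simpa using hpi
    have hodd : PySem.Int.mod ((pvCounts xs).getD p.1 0) 2 = 1 := by
      rw [PySem.Dict.getD_of_get?_eq_some _ 0 hg]
      simpa using hpq
    refine ⟨p.1, ?_⟩
    rw [hinv p.1, if_pos hodd, hpe]

-- ===== VERDICT (by name: the statement is the Claim_ definition above) =====
theorem check_spec : Claim_equal_check := by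
  intro s _
  unfold Spec_check check check_alt pvFinishA
  rw [foldA_eq]
  have hmem := mem_survivors_iff s.toList
  have hmin := min?_congr _ _ hmem
  by_cases hsz : 0 < ((PySem.List.enumerate s.toList 0).foldl stepA PySem.Dict.empty).size
  · rw [if_pos hsz, hmin]
  · rw [if_neg hsz]
    have hitems : ((PySem.List.enumerate s.toList 0).foldl stepA PySem.Dict.empty).items = [] := by
      have : ((PySem.List.enumerate s.toList 0).foldl stepA PySem.Dict.empty).items.length = 0 := by
        simpa [PySem.Dict.size] using Nat.eq_zero_of_not_pos hsz
      exact List.eq_nil_of_length_eq_zero this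
    have hvals : ((PySem.List.enumerate s.toList 0).foldl stepA PySem.Dict.empty).values = [] := by
      simp [PySem.Dict.values, hitems]
    have hsurv : pvSurvivors s.toList = [] := by
      refine List.eq_nil_iff_forall_not_mem.mpr (fun v hv => ?_)
      have := (hmem v).mpr hv
      rw [hvals] at this
      exact List.not_mem_nil this
    rw [hsurv]
    rfl
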